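-- pv_equiv track=rewrite | github.com/TransGG/uncute-rina-revolt | utils.py | safe_string
-- ===== SOURCE A (Python) =====
-- def safe_string(string: str):
--     index = 0
--     while index < len(string):
--         if string[index] == "@":
--             # if matching (regex) /[^\\]+@/g (@ followed by no backslash)
--             if index != 0 and string[index-1] != "\\":
--                 string = string[:index] + '\\' + string[index:]
--                 index += 1 # increment 1 because string length got 1 longer
--         index += 1
--     return string
-- ===== SOURCE B (Python) =====
-- def safe_string(string: str):
--     # one pass over adjacent character pairs; a leading character is never escaped
--     return string[:1] + ''.join(
--         ('\\' + c) if c == '@' and p != '\\' else c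
--         for p, c in zip(string, string[1:])
--     )
-- ===== Notes on version B (the rewrite author's own statement) =====
-- stated objective: simpler
-- what changed: Replaced the index-while loop that repeatedly re-slices and grows the string in place with a single comprehension over adjacent character pairs from zip(string, string[1:]) that emits each character, prefixing the escape character when the character is the at-sign and its predecessor is not a backslash.
import Mathlib
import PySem

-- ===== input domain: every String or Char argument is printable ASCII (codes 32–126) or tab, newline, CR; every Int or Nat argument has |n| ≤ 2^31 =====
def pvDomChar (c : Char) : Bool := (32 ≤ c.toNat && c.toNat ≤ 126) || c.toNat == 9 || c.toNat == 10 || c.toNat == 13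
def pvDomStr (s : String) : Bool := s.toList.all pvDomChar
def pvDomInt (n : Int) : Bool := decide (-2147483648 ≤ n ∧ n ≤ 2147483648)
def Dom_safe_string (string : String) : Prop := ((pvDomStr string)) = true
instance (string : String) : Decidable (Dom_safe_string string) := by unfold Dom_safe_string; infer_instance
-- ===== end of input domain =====

-- B replaces A's in-place index/insert while-loop by a single pass over adjacent character pairs (simpler).

-- ===== PORT A =====
-- A's while loop: index is a Nat (starts at 0, only increases); string[index] is read
-- only under the loop guard index < len(string) and string[index-1] only under index != 0,
-- so both indices are in range and the guarded getElem is exact; the slice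
-- string[:index] + '\' + string[index:] is take/drop with a nonnegative in-range index.
def safeLoopA (s : List Char) (idx : Nat) : List Char :=
  if h : idx < s.length then
    if s[idx] = '@' then
      if idx ≠ 0 ∧ s[idx - 1]'(Nat.lt_of_le_of_lt (Nat.sub_le _ _) h) ≠ '\\' then
        safeLoopA (s.take idx ++ '\\' :: s.drop idx) (idx + 2)
      else safeLoopA s (idx + 1)
    else safeLoopA s (idx + 1)
  else s
termination_by s.length - idx
decreasing_by
  · simp; omega
  · omega
  · omega

def safe_string (string : String) : String :=
  String.ofList (safeLoopA string.toList 0)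

-- ===== PORT B =====
-- Source B: string[:1] + ''.join(('\\'+c) if c=='@' and p!='\\' else c for p,c in zip(string, string[1:]))
def safe_string_alt (string : String) : String :=
  let l := string.toList
  String.ofList (l.take 1 ++
    (List.zip l l.tail).flatMap (fun pc => if pc.2 = '@' ∧ pc.1 ≠ '\\' then ['\\', pc.2] else [pc.2]))

-- ===== PRECONDITION & SPEC =====
def Spec_safe_string (string : String) (out : String) : Prop := out = safe_string_alt string
instance (string : String) (out : String) : Decidable (Spec_safe_string string out) := by unfold Spec_safe_string; infer_instance

-- ===== CLAIM (what is proved, stated in full; the proofs are below) =====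
def Claim_equal_safe_string : Prop := ∀ (string : String), Dom_safe_string string → Spec_safe_string string (safe_string string)

-- ===== LEMMAS AND PROOFS =====

-- recursive characterisation of B's pairwise pass: previous char p, remaining chars
def goB (p : Char) (rest : List Char) : List Char :=
  match rest with
  | [] => []
  | c :: rs => (if c = '@' ∧ p ≠ '\\' then ['\\', c] else [c]) ++ goB c rs

theorem goB_eq_flatMap (p : Char) (rest : List Char) :
    (List.zip (p :: rest) rest).flatMap
      (fun pc => if pc.2 = '@' ∧ pc.1 ≠ '\\' then ['\\', pc.2] else [pc.2]) = goB p rest := by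
  induction rest generalizing p with
  | nil => rfl
  | cons c rs ih => simp [goB, ← ih c]

theorem safeLoopA_invariant (rest : List Char) :
    ∀ (p : Char) (d : List Char),
    safeLoopA ((d ++ [p]) ++ rest) (d.length + 1) = (d ++ [p]) ++ goB p rest := by
  induction rest with
  | nil =>
    intro p d
    rw [safeLoopA]
    simp [goB]
  | cons c rs ih =>
    intro p d
    rw [safeLoopA]
    have hlt : d.length + 1 < ((d ++ [p]) ++ c :: rs).length := by simp
    have hc : ∀ (h : d.length + 1 < ((d ++ [p]) ++ c :: rs).length),
        ((d ++ [p]) ++ c :: rs)[d.length + 1]'h = c := by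
      intro h
      rw [List.getElem_append_right (by simp)]
      simp
    have hp : ∀ (h : d.length + 1 - 1 < ((d ++ [p]) ++ c :: rs).length),
        ((d ++ [p]) ++ c :: rs)[d.length + 1 - 1]'h = p := by
      intro h
      simp only [Nat.add_sub_cancel] at h ⊢
      rw [List.getElem_append_left (by simp)]
      simp
    simp only [hlt, dif_pos, hc, hp]
    by_cases h1 : c = '@'
    · by_cases h2 : p = '\\'
      · -- previous char is a backslash: no escape
        rw [if_pos h1, if_neg (by simp [h2])]
        have := ih c (d ++ [p])
        simp only [List.append_assoc, List.cons_append, List.nil_append,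
          List.length_append, List.length_cons, List.length_nil] at this ⊢
        simpa [goB, h1, h2] using this
      · -- escape: insert a backslash before the '@'
        rw [if_pos h1, if_pos ⟨by omega, h2⟩]
        have htake : ((d ++ [p]) ++ c :: rs).take (d.length + 1) = d ++ [p] := by
          rw [List.take_append_of_le_length (by simp)]; simp
        have hdrop : ((d ++ [p]) ++ c :: rs).drop (d.length + 1) = c :: rs := by
          rw [List.drop_append_of_le_length (by simp)]; simp
        rw [htake, hdrop]
        have heq : (d ++ [p]) ++ '\\' :: c :: rs = ((d ++ [p, '\\']) ++ [c]) ++ rs := by simp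
        have hidx : d.length + 1 + 2 = (d ++ [p, '\\']).length + 1 := by simp
        rw [heq, hidx, ih c (d ++ [p, '\\'])]
        simp [goB, h1, h2]
    · -- not an '@': just advance
      rw [if_neg h1]
      have := ih c (d ++ [p])
      simp only [List.append_assoc, List.cons_append, List.nil_append,
        List.length_append, List.length_cons, List.length_nil] at this ⊢
      simpa [goB, h1] using this

theorem safeLoopA_start (c : Char) (rest : List Char) :
    safeLoopA (c :: rest) 1 = c :: goB c rest := by
  have := safeLoopA_invariant rest c []
  simpa using this

-- ===== VERDICT (by name: the statement is the Claim_ definition above) =====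
theorem safe_string_spec : Claim_equal_safe_string := by
  intro string _
  unfold Spec_safe_string safe_string safe_string_alt
  cases hl : string.toList with
  | nil => rw [safeLoopA]; simp
  | cons c rest =>
    rw [safeLoopA]
    have h0 : 0 < (c :: rest).length := by simp
    simp only [h0, dif_pos]
    split_ifs with hA hB
    · exact absurd hB.1 (by simp)
    · rw [safeLoopA_start]
      simp [goB_eq_flatMap]
    · rw [safeLoopA_start]
      simp [goB_eq_flatMap]
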